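-- pv_equiv track=rewrite | github.com/kriyokhyan-sys/75DaysLeetCodeChallenge | 2946-matrix-similarity-after-cyclic-shifts/2946-matrix-similarity-after-cyclic-shifts.py | areSimilar
-- ===== SOURCE A (Python) =====
-- def areSimilar(mat, k):
--     m = len(mat)
--     n = len(mat[0])
--     shift = k % n
--
--     if shift == 0:
--         return True
--
--     for i in range(m):
--         for j in range(n):
--             if mat[i][j] != mat[i][(j + shift) % n]:
--                 return False
--
--     return True
-- ===== SOURCE B (Python) =====
-- def areSimilar(mat, k):
--     n = len(mat[0])
--     shift = k % n
--     if shift == 0: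
--         return True
--     return all(r == r[shift:] + r[:shift] for r in mat)
-- ===== Notes on version B (the rewrite author's own statement) =====
-- stated objective: simpler
-- what changed: Replaces the nested index-arithmetic scan (compare mat[i][j] with mat[i][(j+shift)%n] for every i,j) with a whole-row rotation check: each row is compared once against its slice-concatenation rotation r[shift:]+r[:shift] inside a single all(...).
-- outside the precondition, e.g. on areSimilar([[1, 1], [1, 1, 2]], 1): A returns True, B returns False
import Mathlib
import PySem

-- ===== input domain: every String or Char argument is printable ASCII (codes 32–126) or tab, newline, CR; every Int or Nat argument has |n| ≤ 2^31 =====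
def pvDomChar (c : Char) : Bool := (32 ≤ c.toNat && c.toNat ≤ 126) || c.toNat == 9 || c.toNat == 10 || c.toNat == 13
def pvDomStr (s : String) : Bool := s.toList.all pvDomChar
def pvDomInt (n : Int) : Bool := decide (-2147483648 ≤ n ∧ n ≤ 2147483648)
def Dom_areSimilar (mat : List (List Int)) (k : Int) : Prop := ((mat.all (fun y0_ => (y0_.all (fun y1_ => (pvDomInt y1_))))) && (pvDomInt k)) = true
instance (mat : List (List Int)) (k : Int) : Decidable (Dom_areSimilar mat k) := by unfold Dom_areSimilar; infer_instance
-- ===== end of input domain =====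

-- B replaces A's nested index-arithmetic scan by comparing each row once with its
-- slice-concatenation rotation (simpler decomposition; same asymptotic cost).

-- ===== PORT A =====
def areSimilar (mat : List (List Int)) (k : Int) : Bool :=
  let m := mat.length
  let n := (PySem.List.pyGetD mat 0 []).length
  let shift := PySem.Int.mod k (n : Int)
  if shift = 0 then true
  else
    (PySem.List.pyRange 0 (m : Int) 1).all (fun i =>
      (PySem.List.pyRange 0 (n : Int) 1).all (fun j =>
        PySem.List.pyGetD (PySem.List.pyGetD mat i []) j 0 ==
        PySem.List.pyGetD (PySem.List.pyGetD mat i []) (PySem.Int.mod (j + shift) (n : Int)) 0))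

-- ===== PORT B =====
def areSimilar_alt (mat : List (List Int)) (k : Int) : Bool :=
  let n := (PySem.List.pyGetD mat 0 []).length
  let shift := PySem.Int.mod k (n : Int)
  if shift = 0 then true
  else
    mat.all (fun r =>
      r == PySem.List.slice r (some shift) none ++ PySem.List.slice r none (some shift))

-- ===== PRECONDITION & SPEC =====
-- Pre_ excludes: the empty matrix and an empty first row (A raises IndexError /
-- ZeroDivisionError there), and ragged matrices — rows of a length different from the
-- first row's — on some of which A still returns a value read only from the first n
-- columns, an accident of its index arithmetic (see cites).
def Pre_areSimilar (mat : List (List Int)) (k : Int) : Prop :=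
  mat ≠ [] ∧ (mat.headD []).length ≠ 0 ∧ ∀ r ∈ mat, r.length = (mat.headD []).length
instance (mat : List (List Int)) (k : Int) : Decidable (Pre_areSimilar mat k) := by
  unfold Pre_areSimilar; infer_instance

def pvWitness_areSimilar : List (List Int) × Int := ([[1, 2, 1, 2], [3, 3, 3, 3]], 2)

def Spec_areSimilar (mat : List (List Int)) (k : Int) (out : Bool) : Prop := out = areSimilar_alt mat k
instance (mat : List (List Int)) (k : Int) (out : Bool) : Decidable (Spec_areSimilar mat k out) := by unfold Spec_areSimilar; infer_instance

-- ===== CLAIM (what is proved, stated in full; the proofs are below) =====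
def Claim_equal_areSimilar : Prop := ∀ (mat : List (List Int)) (k : Int), Dom_areSimilar mat k → Pre_areSimilar mat k → Spec_areSimilar mat k (areSimilar mat k)

-- ===== LEMMAS AND PROOFS =====

-- One row: A's index-by-index comparison against the (j+shift)%n entry holds for all j
-- iff the row equals B's slice-concatenation rotation, for a row of length n and a
-- shift s with 0 ≤ s < n.
lemma row_eq (r : List Int) (n : Nat) (hr : r.length = n) (s : Int)
    (hs0 : 0 ≤ s) (hsn : s < (n : Int)) :
    (∀ j : Int, 0 ≤ j → j < (n : Int) →
        PySem.List.pyGetD r j 0 = PySem.List.pyGetD r (PySem.Int.mod (j + s) (n : Int)) 0)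
      ↔ r = PySem.List.slice r (some s) none ++ PySem.List.slice r none (some s) := by
  subst hr
  have hsnat : s = ((s.toNat : Nat) : Int) := (Int.toNat_of_nonneg hs0).symm
  have hlt : s.toNat < r.length := by omega
  rw [PySem.List.slice_from r hs0, PySem.List.slice_to r hs0,
    ← List.rotate_eq_drop_append_take (by omega : s.toNat ≤ r.length)]
  have hmod : ∀ i : Nat, PySem.Int.mod ((i : Int) + s) (r.length : Int)
      = (((i + s.toNat) % r.length : Nat) : Int) := by
    intro i
    rw [hsnat, ← Nat.cast_add, PySem.Int.mod_natCast]
    simp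
  constructor
  · intro h
    refine List.ext_getElem (by simp) ?_
    intro i h1 h2
    have hmlt : (i + s.toNat) % r.length < r.length := Nat.mod_lt _ (by omega)
    have hkey := h (i : Int) (Int.natCast_nonneg i) (by exact_mod_cast h1)
    rw [hmod i] at hkey
    rw [PySem.List.pyGetD_eq_getElem r 0 (Int.natCast_nonneg i) (by exact_mod_cast h1)] at hkey
    rw [PySem.List.pyGetD_eq_getElem r 0 (Int.natCast_nonneg _) (by exact_mod_cast hmlt)] at hkey
    rw [List.getElem_rotate]
    simp only [Int.toNat_natCast] at hkey
    exact hkey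
  · intro h j hj0 hjn
    have hj : j.toNat < r.length := by omega
    have hmlt : (j.toNat + s.toNat) % r.length < r.length := Nat.mod_lt _ (by omega)
    have e1 : r[j.toNat]'hj = (r.rotate s.toNat)[j.toNat]'(by simpa using hj) :=
      List.getElem_of_eq h hj
    have e2 := List.getElem_rotate r s.toNat (k := j.toNat) (by simpa using hj)
    have hkey := e1.trans e2
    have hjcast : j = ((j.toNat : Nat) : Int) := (Int.toNat_of_nonneg hj0).symm
    rw [hjcast, hmod j.toNat]
    rw [PySem.List.pyGetD_eq_getElem r 0 (Int.natCast_nonneg _) (by exact_mod_cast hj)]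
    rw [PySem.List.pyGetD_eq_getElem r 0 (Int.natCast_nonneg _) (by exact_mod_cast hmlt)]
    simp only [Int.toNat_natCast]
    exact hkey

lemma pyGetD_zero_headD (mat : List (List Int)) :
    PySem.List.pyGetD mat 0 [] = mat.headD [] := by
  cases mat <;> simp [PySem.List.pyGetD_zero]

-- ===== VERDICT (by name: the statement is the Claim_ definition above) =====
theorem areSimilar_spec : Claim_equal_areSimilar := by
  intro mat k _ hpre
  obtain ⟨hne, hn0, hlen⟩ := hpre
  unfold Spec_areSimilar areSimilar areSimilar_alt
  simp only [pyGetD_zero_headD]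
  set n := (mat.headD []).length with hn
  have hnpos : 0 < n := Nat.pos_of_ne_zero hn0
  by_cases hsh : PySem.Int.mod k (n : Int) = 0
  · simp [hsh]
  · simp only [hsh, if_false]
    set s := PySem.Int.mod k (n : Int) with hs
    have hs0 : 0 ≤ s := PySem.Int.mod_nonneg k (by exact_mod_cast hnpos)
    have hsn : s < (n : Int) := PySem.Int.mod_lt k (by exact_mod_cast hnpos)
    rw [Bool.eq_iff_iff]
    simp only [List.all_eq_true, PySem.List.mem_pyRange_one, and_imp, beq_iff_eq]
    constructor
    · intro h r hr
      obtain ⟨i, hi, hieq⟩ := List.mem_iff_getElem.mp hr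
      have hkey := h (i : Int) (Int.natCast_nonneg i) (by exact_mod_cast hi)
      rw [PySem.List.pyGetD_eq_getElem mat [] (Int.natCast_nonneg i) (by exact_mod_cast hi)] at hkey
      simp only [Int.toNat_natCast] at hkey
      rw [← hieq]
      exact (row_eq (mat[i]'hi) n (hlen _ (List.getElem_mem hi)) s hs0 hsn).mp hkey
    · intro h i hi0 hin
      have hilt : i.toNat < mat.length := by omega
      have hmem : mat[i.toNat]'hilt ∈ mat := List.getElem_mem hilt
      rw [PySem.List.pyGetD_eq_getElem mat [] hi0 (by omega)]
      exact (row_eq (mat[i.toNat]'hilt) n (hlen _ hmem) s hs0 hsn).mpr (h _ hmem)
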